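-- pv_equiv track=rewrite | github.com/ReconquestP2P/Reconquest | bitcoin_escrow.py | encode_bech32_address
-- ===== SOURCE A (Python) =====
-- def bech32_polymod(values):
--     """Internal function for bech32 checksum."""
--     GEN = [0x3b6a57b2, 0x26508e6d, 0x1ea119fa, 0x3d4233dd, 0x2a1462b3]
--     chk = 1
--     for value in values:
--         top = chk >> 25
--         chk = (chk & 0x1ffffff) << 5 ^ value
--         for i in range(5):
--             chk ^= GEN[i] if ((top >> i) & 1) else 0
--     return chk
--
-- def bech32_hrp_expand(hrp):
--     """Expand the HRP into values for checksum computation."""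
--     return [ord(x) >> 5 for x in hrp] + [0] + [ord(x) & 31 for x in hrp]
--
-- def bech32_create_checksum(hrp, data):
--     """Compute the checksum values given HRP and data."""
--     values = bech32_hrp_expand(hrp) + data
--     polymod = bech32_polymod(values + [0, 0, 0, 0, 0, 0]) ^ 1
--     return [(polymod >> 5 * (5 - i)) & 31 for i in range(6)]
--
-- def convertbits(data, frombits, tobits, pad=True):
--     """General power-of-2 base conversion."""
--     acc = 0
--     bits = 0
--     ret = []
--     maxv = (1 << tobits) - 1
--     max_acc = (1 << (frombits + tobits - 1)) - 1
--     for value in data: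
--         if value < 0 or (value >> frombits):
--             return None
--         acc = ((acc << frombits) | value) & max_acc
--         bits += frombits
--         while bits >= tobits:
--             bits -= tobits
--             ret.append((acc >> bits) & maxv)
--     if pad:
--         if bits:
--             ret.append((acc << (tobits - bits)) & maxv)
--     elif bits >= frombits or ((acc << (tobits - bits)) & maxv):
--         return None
--     return ret
--
-- def encode_bech32_address(hrp, witver, witprog):
--     """Encode a witness program as a bech32 address using correct bech32 charset."""
--     CHARSET = "qpzry9x8gf2tvdw0s3jn54khce6mua7l"
--
--     ret = hrp + '1'
--     converted_bits = convertbits(witprog, 8, 5)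
--     if converted_bits is None:
--         return None
--     data = [witver] + converted_bits
--     data += bech32_create_checksum(hrp, data)
--     ret += ''.join([CHARSET[d] for d in data])
--     return ret
-- ===== SOURCE B (Python) =====
-- def encode_bech32_address(hrp, witver, witprog):
--     """Encode a witness program as a bech32 address (big-integer bit extraction)."""
--     CHARSET = "qpzry9x8gf2tvdw0s3jn54khce6mua7l"
--     GEN = [0x3b6a57b2, 0x26508e6d, 0x1ea119fa, 0x3d4233dd, 0x2a1462b3]
--     # 8->5 bit conversion via one big integer instead of a streaming accumulator
--     for v in witprog:
--         if v < 0 or v > 255: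
--             return None
--     total = 8 * len(witprog)
--     pad = (5 - total % 5) % 5
--     n = 0
--     for v in witprog:
--         n = n * 256 + v
--     n <<= pad
--     k = (total + pad) // 5
--     data = [witver] + [(n >> 5 * (k - 1 - j)) & 31 for j in range(k)]
--     # checksum
--     values = [ord(c) >> 5 for c in hrp] + [0] + [ord(c) & 31 for c in hrp] + data + [0, 0, 0, 0, 0, 0]
--     chk = 1
--     for v in values:
--         top = chk >> 25
--         chk = (chk & 0x1ffffff) << 5 ^ v
--         for i in range(5):
--             if (top >> i) & 1:
--                 chk ^= GEN[i]
--     pm = chk ^ 1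
--     csum = []
--     for _ in range(6):
--         csum.append(pm & 31)
--         pm >>= 5
--     csum.reverse()
--     data += csum
--     return hrp + '1' + ''.join(CHARSET[d] for d in data)
-- ===== Notes on version B (the rewrite author's own statement) =====
-- stated objective: alternative
-- what changed: B validates the bytes up front, then does the 8-to-5-bit regrouping by packing witprog into one big integer, left-padding it to a multiple of 5 bits and slicing 5-bit groups from the most-significant end (instead of A's streaming accumulator with an inner while loop), and builds the 6 checksum symbols back-to-front by masking and shifting the polymod value 5 bits at a time and reversing (instead of A's shift-table comprehension).
import Mathlib
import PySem

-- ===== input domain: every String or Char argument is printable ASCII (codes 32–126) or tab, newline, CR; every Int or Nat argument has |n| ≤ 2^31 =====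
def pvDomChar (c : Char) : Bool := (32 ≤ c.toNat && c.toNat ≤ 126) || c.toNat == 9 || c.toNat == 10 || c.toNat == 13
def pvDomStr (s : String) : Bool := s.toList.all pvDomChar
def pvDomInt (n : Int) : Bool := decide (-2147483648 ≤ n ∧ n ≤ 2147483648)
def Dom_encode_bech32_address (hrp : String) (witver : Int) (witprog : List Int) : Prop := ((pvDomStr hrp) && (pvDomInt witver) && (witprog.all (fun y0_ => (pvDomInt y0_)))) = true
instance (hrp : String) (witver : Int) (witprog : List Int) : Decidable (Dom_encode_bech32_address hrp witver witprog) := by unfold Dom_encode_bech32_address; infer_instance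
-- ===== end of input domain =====

-- B replaces A's streaming accumulator 8→5-bit regrouping by a single big-integer
-- bit-extraction pass and builds the checksum symbols back-to-front (objective: alternative).

-- ===== PORT A =====
def pvGEN : List Int := [0x3b6a57b2, 0x26508e6d, 0x1ea119fa, 0x3d4233dd, 0x2a1462b3]

def pvCHARSET : String := "qpzry9x8gf2tvdw0s3jn54khce6mua7l"

def bech32_polymod (values : List Int) : Int :=
  values.foldl (fun chk value =>
    let top := chk >>> (25 : Nat)
    let chk1 := PySem.Int.bxor ((PySem.Int.band chk 0x1ffffff) <<< (5 : Nat)) value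
    (List.range 5).foldl (fun c (i : Nat) =>
      PySem.Int.bxor c (if PySem.Int.band (top >>> i) 1 ≠ 0 then pvGEN[i]! else 0)) chk1) 1

def bech32_hrp_expand (hrp : String) : List Int :=
  hrp.toList.map (fun x => ((x.toNat : Int)) >>> (5 : Nat)) ++ [0]
    ++ hrp.toList.map (fun x => PySem.Int.band (x.toNat : Int) 31)

def bech32_create_checksum (hrp : String) (data : List Int) : List Int :=
  let values := bech32_hrp_expand hrp ++ data
  let polymod := PySem.Int.bxor (bech32_polymod (values ++ [0, 0, 0, 0, 0, 0])) 1
  (List.range 6).map (fun i => PySem.Int.band (polymod >>> (5 * (5 - i) : Nat)) 31)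

-- the `while bits >= tobits` inner loop of convertbits (0 < tobits is a totality guard:
-- Python would loop forever there, and convertbits is only called with tobits = 5)
def cbWhile (tobits : Nat) (maxv acc : Int) (bits : Nat) (ret : List Int) : Nat × List Int :=
  if h : tobits ≤ bits ∧ 0 < tobits then
    cbWhile tobits maxv acc (bits - tobits) (ret ++ [PySem.Int.band (acc >>> (bits - tobits)) maxv])
  else (bits, ret)
termination_by bits
decreasing_by omega

-- the `for value in data` loop of convertbits
def cbGo (frombits tobits : Nat) (maxv max_acc : Int) :
    List Int → Int → Nat → List Int → Option (Int × Nat × List Int)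
  | [], acc, bits, ret => some (acc, bits, ret)
  | value :: rest, acc, bits, ret =>
    if value < 0 ∨ (value >>> frombits) ≠ 0 then none
    else
      let acc' := PySem.Int.band (PySem.Int.bor (acc <<< frombits) value) max_acc
      let br := cbWhile tobits maxv acc' (bits + frombits) ret
      cbGo frombits tobits maxv max_acc rest acc' br.1 br.2

def convertbits (data : List Int) (frombits tobits : Nat) (padFlag : Bool) : Option (List Int) :=
  let maxv : Int := (1 <<< tobits) - 1
  let max_acc : Int := (1 <<< (frombits + tobits - 1)) - 1
  match cbGo frombits tobits maxv max_acc data 0 0 [] with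
  | none => none
  | some (acc, bits, ret) =>
    if padFlag then
      if bits ≠ 0 then some (ret ++ [PySem.Int.band (acc <<< (tobits - bits)) maxv]) else some ret
    else if frombits ≤ bits ∨ PySem.Int.band (acc <<< (tobits - bits)) maxv ≠ 0 then none
    else some ret

def encode_bech32_address (hrp : String) (witver : Int) (witprog : List Int) : Option String :=
  match convertbits witprog 8 5 true with
  | none => none
  | some converted_bits =>
    let data := witver :: converted_bits
    let data := data ++ bech32_create_checksum hrp data
    -- CHARSET[d]: Python raises IndexError when d is out of range (outside Pre_); pyGet? is none there
    match data.mapM (fun d => PySem.Str.pyGet? pvCHARSET d) with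
    | none => none
    | some cs => some (hrp ++ "1" ++ String.ofList cs)

-- ===== PORT B =====
def encode_bech32_address_alt (hrp : String) (witver : Int) (witprog : List Int) : Option String :=
  if witprog.any (fun v => v < 0 || 255 < v) then none
  else
    let total := 8 * witprog.length
    let pad := (5 - total % 5) % 5
    let n := (witprog.foldl (fun n v => n * 256 + v) 0) <<< pad
    let k := (total + pad) / 5
    let data := witver :: (List.range k).map (fun j => PySem.Int.band (n >>> (5 * (k - 1 - j) : Nat)) 31)
    let values := hrp.toList.map (fun c => ((c.toNat : Int)) >>> (5 : Nat)) ++ [0]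
      ++ hrp.toList.map (fun c => PySem.Int.band (c.toNat : Int) 31) ++ data ++ [0, 0, 0, 0, 0, 0]
    let chk := values.foldl (fun chk v =>
      let top := chk >>> (25 : Nat)
      let chk1 := PySem.Int.bxor ((PySem.Int.band chk 0x1ffffff) <<< (5 : Nat)) v
      (List.range 5).foldl (fun c (i : Nat) =>
        if PySem.Int.band (top >>> i) 1 ≠ 0 then PySem.Int.bxor c pvGEN[i]! else c) chk1) 1
    let st := (List.range 6).foldl
      (fun (st : Int × List Int) _ => (st.1 >>> (5 : Nat), st.2 ++ [PySem.Int.band st.1 31]))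
      (PySem.Int.bxor chk 1, [])
    let data := data ++ st.2.reverse
    match data.mapM (fun d => PySem.Str.pyGet? pvCHARSET d) with
    | none => none
    | some cs => some (hrp ++ "1" ++ String.ofList cs)

-- ===== PRECONDITION & SPEC =====
-- Pre_ excludes exactly the inputs where Python A raises IndexError (CHARSET[witver] with
-- witver outside -32..31, reached only when every witprog value is a byte); B raises there too.
def Pre_encode_bech32_address (hrp : String) (witver : Int) (witprog : List Int) : Prop :=
  (∀ v ∈ witprog, 0 ≤ v ∧ v < 256) → (-32 ≤ witver ∧ witver ≤ 31)

instance (hrp : String) (witver : Int) (witprog : List Int) : Decidable (Pre_encode_bech32_address hrp witver witprog) := by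
  unfold Pre_encode_bech32_address; infer_instance

def pvWitness_encode_bech32_address : String × Int × List Int := ("bc", 0, [1, 200])

def Spec_encode_bech32_address (hrp : String) (witver : Int) (witprog : List Int) (out : Option String) : Prop := out = encode_bech32_address_alt hrp witver witprog
instance (hrp : String) (witver : Int) (witprog : List Int) (out : Option String) : Decidable (Spec_encode_bech32_address hrp witver witprog out) := by unfold Spec_encode_bech32_address; infer_instance

-- ===== CLAIM (what is proved, stated in full; the proofs are below) =====
def Claim_equal_encode_bech32_address : Prop := ∀ (hrp : String) (witver : Int) (witprog : List Int), Dom_encode_bech32_address hrp witver witprog → Pre_encode_bech32_address hrp witver witprog → Spec_encode_bech32_address hrp witver witprog (encode_bech32_address hrp witver witprog)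

-- ===== LEMMAS AND PROOFS =====


-- value of a byte list read as one big base-256 integer, starting from accumulator m
def valN (m : Nat) (bs : List Int) : Nat := bs.foldl (fun n v => n * 256 + v.toNat) m

theorem valN_nil (m : Nat) : valN m [] = m := rfl

theorem valN_cons (m : Nat) (v : Int) (bs : List Int) :
    valN m (v :: bs) = valN (m * 256 + v.toNat) bs := rfl

theorem valN_decompose (bs : List Int) : ∀ m : Nat,
    valN m bs = m * 256 ^ bs.length + valN 0 bs := by
  induction bs with
  | nil => intro m; simp [valN]
  | cons v bs ih =>
    intro m
    rw [valN_cons, ih, valN_cons 0, ih (0 * 256 + v.toNat)]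
    simp [List.length_cons, pow_succ]
    ring

theorem valN_lt (bs : List Int) (hv : ∀ v ∈ bs, 0 ≤ v ∧ v < 256) :
    valN 0 bs < 256 ^ bs.length := by
  induction bs with
  | nil => simp [valN]
  | cons v bs ih =>
    have hv0 := hv v (by simp)
    have hvt : v.toNat < 256 := by omega
    have ih' := ih (fun w hw => hv w (by simp [hw]))
    rw [valN_cons, valN_decompose]
    have h1 : (0 * 256 + v.toNat) * 256 ^ bs.length ≤ 255 * 256 ^ bs.length := by
      apply Nat.mul_le_mul_right; omega
    calc (0 * 256 + v.toNat) * 256 ^ bs.length + valN 0 bs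
        < (0 * 256 + v.toNat) * 256 ^ bs.length + 256 ^ bs.length := by omega
      _ ≤ 255 * 256 ^ bs.length + 256 ^ bs.length := by omega
      _ = 256 ^ (bs.length + 1) := by ring
      _ = 256 ^ (v :: bs).length := by simp

theorem and31 (x : Nat) : x &&& 31 = x % 32 := by
  have h := Nat.and_two_pow_sub_one_eq_mod x 5
  norm_num at h
  exact h

theorem and4095 (x : Nat) : x &&& 4095 = x % 4096 := by
  have h := Nat.and_two_pow_sub_one_eq_mod x 12
  norm_num at h
  exact h

-- B's big-integer fold agrees with valN on byte lists
theorem foldl_int_valN (bs : List Int) (hv : ∀ v ∈ bs, 0 ≤ v ∧ v < 256) : ∀ m : Nat,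
    bs.foldl (fun n v => n * 256 + v) ((m : Nat) : Int) = ((valN m bs : Nat) : Int) := by
  induction bs with
  | nil => intro m; simp [valN]
  | cons v bs ih =>
    intro m
    have hv0 := hv v (by simp)
    have ih' := ih (fun w hw => hv w (by simp [hw])) (m * 256 + v.toNat)
    simp only [List.foldl_cons, valN_cons]
    rw [← ih']
    congr 1
    push_cast
    omega

-- bits above the bytes appended by valN are the bits of the accumulator
theorem valN_shiftRight (bs : List Int) (hv : ∀ v ∈ bs, 0 ≤ v ∧ v < 256) (m b : Nat) :
    valN m bs >>> (8 * bs.length + b) = m >>> b := by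
  have hdec := valN_decompose bs m
  have hlt := valN_lt bs hv
  rw [Nat.shiftRight_eq_div_pow, Nat.shiftRight_eq_div_pow, hdec]
  have h256 : (256 : Nat) ^ bs.length = 2 ^ (8 * bs.length) := by
    rw [show (256 : Nat) = 2 ^ 8 from rfl, ← pow_mul]
  rw [h256] at hdec hlt ⊢
  rw [pow_add, ← Nat.div_div_eq_div_mul]
  congr 1
  rw [Nat.mul_comm m, Nat.mul_add_div (by positivity)]
  rw [Nat.div_eq_of_lt hlt]
  omega

-- dropping the accumulator mod 2^12 does not change a 5-bit window at offset ≤ 7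
theorem window_mod (m b : Nat) (hb : b ≤ 7) :
    (m % 4096) >>> b &&& 31 = m >>> b &&& 31 := by
  rw [and31, and31, Nat.shiftRight_eq_div_pow, Nat.shiftRight_eq_div_pow]
  interval_cases b <;> norm_num <;> omega

-- dropping the accumulator mod 2^12 does not change the padded low 5-bit window
theorem window_mod_shl (m p : Nat) (hp : p ≤ 4) :
    (m % 4096) <<< p &&& 31 = m <<< p &&& 31 := by
  rw [and31, and31, Nat.shiftLeft_eq, Nat.shiftLeft_eq]
  interval_cases p <;> norm_num <;> omega

theorem shl_shr (n p x : Nat) : (n <<< p) >>> (x + p) = n >>> x := by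
  rw [Nat.shiftLeft_eq, Nat.shiftRight_eq_div_pow, Nat.shiftRight_eq_div_pow, pow_add]
  rw [Nat.mul_comm (2 ^ x), ← Nat.div_div_eq_div_mul, Nat.mul_div_cancel _ (by positivity)]

theorem int_band31 (x : Nat) : PySem.Int.band ((x : Nat) : Int) 31 = ((x &&& 31 : Nat) : Int) := by
  have h := PySem.Int.band_natCast x 31
  simpa using h

theorem int_band4095 (x : Nat) : PySem.Int.band ((x : Nat) : Int) 4095 = ((x &&& 4095 : Nat) : Int) := by
  have h := PySem.Int.band_natCast x 4095
  simpa using h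

-- a byte passes convertbits' validity test
theorem good_cond (v : Int) (h0 : 0 ≤ v) (h1 : v < 256) :
    ¬(v < 0 ∨ (v >>> (8 : Nat)) ≠ 0) := by
  push_neg
  refine ⟨by omega, ?_⟩
  rw [Int.shiftRight_eq_div_pow]
  norm_num
  omega

theorem bad_cond (v : Int) (h : v < 0 ∨ 255 < v) :
    (v < 0 ∨ (v >>> (8 : Nat)) ≠ 0) := by
  rcases h with h | h
  · exact Or.inl h
  · right
    rw [Int.shiftRight_eq_div_pow]
    norm_num
    omega

theorem cbGo_bad (bs : List Int) : ∀ (acc : Int) (bits : Nat) (ret : List Int),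
    (∃ v ∈ bs, v < 0 ∨ 255 < v) → cbGo 8 5 31 4095 bs acc bits ret = none := by
  induction bs with
  | nil => intro _ _ _ h; simp at h
  | cons v bs ih =>
    intro acc bits ret h
    by_cases hb : v < 0 ∨ 255 < v
    · rw [cbGo]
      simp only [if_pos (bad_cond v hb)]
    · rw [cbGo]
      rw [if_neg (good_cond v (by omega) (by omega))]
      apply ih
      rcases h with ⟨w, hw, hwbad⟩
      rcases List.mem_cons.mp hw with rfl | hw'
      · exact absurd hwbad hb
      · exact ⟨w, hw', hwbad⟩

-- one step of convertbits' accumulator update, on byte input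
theorem acc_step (m nv : Nat) (hnv : nv < 256) :
    PySem.Int.band (PySem.Int.bor ((((m % 4096 : Nat) : Int)) <<< (8 : Nat)) ((nv : Nat) : Int)) 4095
      = (((m * 256 + nv) % 4096 : Nat) : Int) := by
  have h1 : (((m % 4096 : Nat) : Int)) <<< (8 : Nat) = (((m % 4096) <<< 8 : Nat) : Int) :=
    (Int.natCast_shiftLeft _ _).symm
  rw [h1, PySem.Int.bor_natCast, int_band4095, and4095]
  have h2 : (m % 4096) <<< 8 ||| nv = (m % 4096) <<< 8 + nv :=
    (Nat.shiftLeft_add_eq_or_of_lt (by omega : nv < 2 ^ 8) (m % 4096)).symm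
  have h3 : (m % 4096) <<< 8 = (m % 4096) * 256 := by
    rw [Nat.shiftLeft_eq]
  congr 1
  rw [h2, h3]
  omega

-- the inner while loop on an 8-bit refill
theorem cbWhile_spec (acc : Int) (β : Nat) (hβ : β < 5) (ret : List Int) :
    cbWhile 5 31 acc (β + 8) ret =
      ((β + 8) % 5,
       ret ++ (if β < 2 then [PySem.Int.band (acc >>> (β + 3)) 31]
               else [PySem.Int.band (acc >>> (β + 3)) 31, PySem.Int.band (acc >>> (β - 2)) 31])) := by
  interval_cases β
  all_goals (rw [cbWhile]; norm_num; rw [cbWhile]; norm_num)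
  all_goals (rw [cbWhile]; norm_num)

-- main loop invariant: state is the big integer mod 2^12 plus the emitted 5-bit groups
theorem cbGo_spec (bs : List Int) : ∀ (m β : Nat) (ret : List Int),
    (∀ v ∈ bs, 0 ≤ v ∧ v < 256) → β < 5 →
    cbGo 8 5 31 4095 bs (((m % 4096 : Nat) : Int)) β ret =
      some ((((valN m bs % 4096 : Nat) : Int)), (β + 8 * bs.length) % 5,
        ret ++ (List.range ((β + 8 * bs.length) / 5)).map
          (fun j => ((valN m bs >>> (β + 8 * bs.length - 5 * (j + 1)) &&& 31 : Nat) : Int))) := by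
  induction bs with
  | nil =>
    intro m β ret hv hβ
    rw [cbGo]
    simp only [List.length_nil, Nat.mul_zero, Nat.add_zero, valN_nil]
    rw [Nat.mod_eq_of_lt hβ, Nat.div_eq_of_lt hβ]
    simp
  | cons v rest ih =>
    intro m β ret hv hβ
    obtain ⟨h0, h1⟩ := hv v (by simp)
    have hv' : ∀ w ∈ rest, 0 ≤ w ∧ w < 256 := fun w hw => hv w (by simp [hw])
    have hvc : v = ((v.toNat : Nat) : Int) := by omega
    have hnvlt : v.toNat < 256 := by omega
    rw [cbGo, if_neg (good_cond v h0 h1)]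
    have hacc : PySem.Int.band (PySem.Int.bor ((((m % 4096 : Nat) : Int)) <<< (8 : Nat)) v) 4095
        = ((((m * 256 + v.toNat) % 4096 : Nat) : Int)) := by
      rw [hvc]; exact acc_step m v.toNat hnvlt
    set m' := m * 256 + v.toNat with hm'
    simp only [hacc, cbWhile_spec _ β hβ]
    have hβ'5 : (β + 8) % 5 < 5 := by omega
    rw [ih m' ((β + 8) % 5) _ hv' hβ'5]
    have hvalN : valN m' rest = valN m (v :: rest) := by rw [valN_cons]
    have hlen : (v :: rest).length = rest.length + 1 := by simp
    refine congrArg some ?_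
    refine Prod.ext ?_ (Prod.ext ?_ ?_)
    · simp [hvalN]
    · simp only [hlen]; omega
    · -- the emitted-groups lists agree
      simp only [hlen]
      rw [← hvalN]
      by_cases hβ2 : β < 2
      · have he : (β + 8 * (rest.length + 1)) / 5 = 1 + ((β + 8) % 5 + 8 * rest.length) / 5 := by
          omega
        rw [if_pos hβ2, he, List.range_add, List.map_append, List.map_map, List.append_assoc]
        congr 1
        congr 1
        · -- singleton emitted now
          simp only [List.range_one, List.map_cons, List.map_nil]
          congr 1
          rw [show ((((m' % 4096 : Nat) : Int)) >>> (β + 3)) = (((m' % 4096) >>> (β + 3) : Nat) : Int)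
              from (Int.natCast_shiftRight _ _).symm]
          rw [int_band31, window_mod m' (β + 3) (by omega)]
          rw [show β + 8 * (rest.length + 1) - 5 * (0 + 1) = 8 * rest.length + (β + 3) by omega]
          rw [valN_shiftRight rest hv' m' (β + 3)]
        · apply List.map_congr_left
          intro j hj
          have hj' := List.mem_range.mp hj
          simp only [Function.comp]
          have hidx : β + 8 * (rest.length + 1) - 5 * (1 + j + 1)
              = (β + 8) % 5 + 8 * rest.length - 5 * (j + 1) := by omega
          rw [hidx]
      · have he : (β + 8 * (rest.length + 1)) / 5 = 2 + ((β + 8) % 5 + 8 * rest.length) / 5 := by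
          omega
        rw [if_neg hβ2, he, List.range_add, List.map_append, List.map_map, List.append_assoc]
        congr 1
        congr 1
        · -- two groups emitted now
          rw [show List.range 2 = [0, 1] from rfl]
          simp only [List.map_cons, List.map_nil]
          congr 1
          · congr 1
            rw [show ((((m' % 4096 : Nat) : Int)) >>> (β + 3)) = (((m' % 4096) >>> (β + 3) : Nat) : Int)
                from (Int.natCast_shiftRight _ _).symm]
            rw [int_band31, window_mod m' (β + 3) (by omega)]
            rw [show β + 8 * (rest.length + 1) - 5 * (0 + 1) = 8 * rest.length + (β + 3) by omega]
            rw [valN_shiftRight rest hv' m' (β + 3)]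
          · congr 1
            congr 1
            rw [show ((((m' % 4096 : Nat) : Int)) >>> (β - 2)) = (((m' % 4096) >>> (β - 2) : Nat) : Int)
                from (Int.natCast_shiftRight _ _).symm]
            rw [int_band31, window_mod m' (β - 2) (by omega)]
            rw [show β + 8 * (rest.length + 1) - 5 * (1 + 1) = 8 * rest.length + (β - 2) by omega]
            rw [valN_shiftRight rest hv' m' (β - 2)]
        · apply List.map_congr_left
          intro j hj
          have hj' := List.mem_range.mp hj
          simp only [Function.comp]
          have hidx : β + 8 * (rest.length + 1) - 5 * (2 + j + 1)
              = (β + 8) % 5 + 8 * rest.length - 5 * (j + 1) := by omega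
          rw [hidx]

-- A's convertbits on valid bytes, in B's big-integer form
theorem convertbits_valid (witprog : List Int) (hv : ∀ v ∈ witprog, 0 ≤ v ∧ v < 256) :
    convertbits witprog 8 5 true =
      some ((List.range ((8 * witprog.length + (5 - 8 * witprog.length % 5) % 5) / 5)).map
        (fun j => ((valN 0 witprog <<< ((5 - 8 * witprog.length % 5) % 5) >>>
            (5 * ((8 * witprog.length + (5 - 8 * witprog.length % 5) % 5) / 5 - 1 - j)) &&& 31 : Nat) : Int))) := by
  have c1 : ((((1 <<< 5 : Nat) : Int)) - 1) = (31 : Int) := by decide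
  have c2 : ((((1 <<< (8 + 5 - 1) : Nat) : Int)) - 1) = (4095 : Int) := by decide
  have hgo := cbGo_spec witprog 0 0 [] hv (by omega)
  norm_num at hgo
  simp only [convertbits, eq_self_iff_true, if_true]
  rw [c1, c2, hgo]
  simp only [Nat.zero_add, List.nil_append]
  set T := 8 * witprog.length with hT
  set N := valN 0 witprog with hN
  by_cases hT5 : T % 5 = 0
  · rw [if_neg (by omega)]
    have hpad : (5 - T % 5) % 5 = 0 := by omega
    rw [hpad]
    refine congrArg some ?_
    apply List.map_congr_left
    intro j hj
    have hj' := List.mem_range.mp hj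
    have hidx : 5 * ((T + 0) / 5 - 1 - j) = T - 5 * (j + 1) := by omega
    rw [hidx, Nat.shiftLeft_zero]
  · rw [if_pos (by omega)]
    have hpad : (5 - T % 5) % 5 = 5 - T % 5 := by omega
    have hk : (T + (5 - T % 5)) / 5 = T / 5 + 1 := by omega
    rw [hpad, hk, List.range_succ, List.map_append]
    refine congrArg some ?_
    congr 1
    · apply List.map_congr_left
      intro j hj
      have hj' := List.mem_range.mp hj
      have hidx : 5 * (T / 5 + 1 - 1 - j) = (T - 5 * (j + 1)) + (5 - T % 5) := by omega
      rw [hidx, shl_shr]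
    · simp only [List.map_cons, List.map_nil]
      congr 1
      have hcast : ((N : Int) % 4096) = (((N % 4096 : Nat) : Int)) := by norm_cast
      rw [hcast]
      rw [show ((((N % 4096 : Nat) : Int)) <<< (5 - T % 5)) = ((((N % 4096) <<< (5 - T % 5)) : Nat) : Int)
          from (Int.natCast_shiftLeft _ _).symm]
      rw [int_band31, window_mod_shl N (5 - T % 5) (by omega)]
      have hidx : 5 * (T / 5 + 1 - 1 - T / 5) = 0 := by omega
      rw [hidx, Nat.shiftRight_zero]

-- the two phrasings of the per-value polymod step agree
theorem polymod_step_eq (chk v : Int) :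
    (List.range 5).foldl (fun (c : Int) (i : Nat) =>
        PySem.Int.bxor c (if PySem.Int.band ((chk >>> (25 : Nat)) >>> i) 1 ≠ 0 then pvGEN[i]! else 0))
      (PySem.Int.bxor ((PySem.Int.band chk 0x1ffffff) <<< (5 : Nat)) v) =
    (List.range 5).foldl (fun (c : Int) (i : Nat) =>
        if PySem.Int.band ((chk >>> (25 : Nat)) >>> i) 1 ≠ 0 then PySem.Int.bxor c pvGEN[i]! else c)
      (PySem.Int.bxor ((PySem.Int.band chk 0x1ffffff) <<< (5 : Nat)) v) := by
  rw [show List.range 5 = [0, 1, 2, 3, 4] from rfl]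
  simp only [List.foldl_cons, List.foldl_nil]
  split_ifs <;> simp [PySem.Int.bxor_zero]

theorem polymod_fold_eq (values : List Int) :
    values.foldl (fun chk v =>
      (List.range 5).foldl (fun (c : Int) (i : Nat) =>
        if PySem.Int.band ((chk >>> (25 : Nat)) >>> i) 1 ≠ 0 then PySem.Int.bxor c pvGEN[i]! else c)
      (PySem.Int.bxor ((PySem.Int.band chk 0x1ffffff) <<< (5 : Nat)) v)) 1 = bech32_polymod values := by
  unfold bech32_polymod
  congr 1
  funext chk v
  exact (polymod_step_eq chk v).symm

-- checksum symbols: back-to-front extraction then reverse = shift table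
theorem int_shr_zero (x : Int) : x >>> (0 : Nat) = x := by
  rw [Int.shiftRight_eq_div_pow]; norm_num

theorem csum_eq (pm : Int) :
    (((List.range 6).foldl
        (fun (st : Int × List Int) _ => (st.1 >>> (5 : Nat), st.2 ++ [PySem.Int.band st.1 31]))
        (pm, [])).2).reverse
      = (List.range 6).map (fun i => PySem.Int.band (pm >>> (5 * (5 - i) : Nat)) 31) := by
  rw [show List.range 6 = [0, 1, 2, 3, 4, 5] from rfl]
  simp only [List.foldl_cons, List.foldl_nil, List.map_cons, List.map_nil,
             List.reverse_cons, List.reverse_nil, List.nil_append, List.cons_append,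
             ← Int.shiftRight_add]
  norm_num [int_shr_zero]


-- A's convertbits succeeds exactly on byte lists; B's validity scan agrees
theorem any_bad_true (witprog : List Int) (hbad : ∃ v ∈ witprog, v < 0 ∨ 255 < v) :
    witprog.any (fun v => v < 0 || 255 < v) = true := by
  rcases hbad with ⟨v, hv1, hv2⟩
  refine List.any_eq_true.mpr ⟨v, hv1, ?_⟩
  rcases hv2 with h | h <;> simp [h]

theorem any_bad_false (witprog : List Int) (hv : ∀ v ∈ witprog, 0 ≤ v ∧ v < 256) :
    witprog.any (fun v => v < 0 || 255 < v) = false := by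
  refine List.any_eq_false.mpr ?_
  intro v hvm
  have := hv v hvm
  simp only [Bool.or_eq_true, decide_eq_true_eq, not_or]
  constructor <;> [omega; omega]

theorem convertbits_bad (witprog : List Int) (hbad : ∃ v ∈ witprog, v < 0 ∨ 255 < v) :
    convertbits witprog 8 5 true = none := by
  have c1 : ((((1 <<< 5 : Nat) : Int)) - 1) = (31 : Int) := by decide
  have c2 : ((((1 <<< (8 + 5 - 1) : Nat) : Int)) - 1) = (4095 : Int) := by decide
  simp only [convertbits]
  rw [c1, c2, cbGo_bad witprog 0 0 [] hbad]

-- ===== VERDICT (by name: the statement is the Claim_ definition above) =====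
theorem encode_bech32_address_spec : Claim_equal_encode_bech32_address := by
  intro hrp witver witprog hdom hpre
  unfold Spec_encode_bech32_address
  by_cases hbad : ∃ v ∈ witprog, v < 0 ∨ 255 < v
  · simp only [encode_bech32_address, convertbits_bad witprog hbad,
               encode_bech32_address_alt, any_bad_true witprog hbad, if_true]
  · have hv : ∀ v ∈ witprog, 0 ≤ v ∧ v < 256 := by
      intro v hvm
      by_contra hc
      exact hbad ⟨v, hvm, by omega⟩
    have hA := convertbits_valid witprog hv
    have hvN := foldl_int_valN witprog hv 0
    norm_num at hvN
    have hG : (List.range ((8 * witprog.length + (5 - 8 * witprog.length % 5) % 5) / 5)).map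
        (fun j => PySem.Int.band
          ((((witprog.foldl (fun n v => n * 256 + v) 0) <<< ((5 - 8 * witprog.length % 5) % 5)) >>>
            (5 * ((8 * witprog.length + (5 - 8 * witprog.length % 5) % 5) / 5 - 1 - j) : Nat))) 31)
        = (List.range ((8 * witprog.length + (5 - 8 * witprog.length % 5) % 5) / 5)).map
        (fun j => ((valN 0 witprog <<< ((5 - 8 * witprog.length % 5) % 5) >>>
            (5 * ((8 * witprog.length + (5 - 8 * witprog.length % 5) % 5) / 5 - 1 - j)) &&& 31 : Nat) : Int)) := by
      apply List.map_congr_left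
      intro j hj
      rw [hvN]
      rw [show (((valN 0 witprog : Nat) : Int)) <<< ((5 - 8 * witprog.length % 5) % 5)
          = (((valN 0 witprog <<< ((5 - 8 * witprog.length % 5) % 5) : Nat) : Int))
          from (Int.natCast_shiftLeft _ _).symm]
      rw [show (((valN 0 witprog <<< ((5 - 8 * witprog.length % 5) % 5) : Nat) : Int)) >>>
            (5 * ((8 * witprog.length + (5 - 8 * witprog.length % 5) % 5) / 5 - 1 - j) : Nat)
          = (((valN 0 witprog <<< ((5 - 8 * witprog.length % 5) % 5) >>>
            (5 * ((8 * witprog.length + (5 - 8 * witprog.length % 5) % 5) / 5 - 1 - j)) : Nat) : Int))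
          from (Int.natCast_shiftRight _ _).symm]
      rw [int_band31]
    simp only [encode_bech32_address, hA, encode_bech32_address_alt,
               any_bad_false witprog hv, Bool.false_eq_true, if_false, hG]
    -- both sides now share the same data prefix; align the checksums
    rw [polymod_fold_eq, csum_eq]
    simp only [bech32_create_checksum, bech32_hrp_expand, bech32_polymod, List.append_assoc,
               List.cons_append, List.nil_append]
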